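-- pv_equiv track=rewrite | github.com/7k1aeu/JAGUIHELL | tools/BDFconv.py | build_14x14_from_12x12
-- ===== SOURCE A (Python) =====
-- from typing import Dict, List, Optional
--
-- def hexrow_to_bits(hexstr: str, width: int) -> List[int]:
--     """hex string -> bits list (MSB first) with given width"""
--     try:
--         val = int(hexstr, 16)
--     except Exception:
--         val = 0
--     bits: List[int] = []
--     for i in range(width):
--         shift = (width - 1 - i)
--         bits.append((val >> shift) & 1)
--     return bits
--
-- def infer_bdf_width_from_hex(hexstr: str) -> int:
--     """hex 表記から幅を推測（hex桁 * 4）。BDF の行は通常行ごとに同じ幅."""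
--     return len(hexstr) * 4
--
-- def build_14x14_from_12x12(bitmap_lines: List[str], expected_w: int = 12, expected_h: int = 12) -> List[int]:
--     """
--     12x12 (または BDF 行から推測したサイズ) の bitmap hex lines から
--     14x14 の列リスト（各列は下位ビットが上行）を生成する。
--     bit 0 = top row (Y=0)、bit 13 = bottom row (Y=13)
--     """
--     rows = 14
--     cols = 14
--     # マトリクス初期化
--     mat = [[0 for _ in range(cols)] for _ in range(rows)]
--     # 12x12 を (1,1) に置く
--     row_offset = 1
--     col_offset = 1
--
--     # BDF の各行の幅を推測（最初の行を使う）
--     bdf_width = expected_w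
--     if bitmap_lines:
--         try:
--             bdf_width = infer_bdf_width_from_hex(bitmap_lines[0])
--         except Exception:
--             bdf_width = expected_w
--
--     # BDF 行数が expected_h でない場合も、上寄せで配置する（行 0 -> row_offset）
--     for r_idx, hexrow in enumerate(bitmap_lines[:expected_h]):
--         bits = hexrow_to_bits(hexrow, bdf_width)
--         # BDF のビット列は左が MSB -> canvas の左から配置
--         for c_idx in range(min(bdf_width, expected_w)):
--             # 列が 12 を超える場合は切り捨て
--             mat[row_offset + r_idx][col_offset + c_idx] = bits[c_idx]
--
--     # ここで垂直方向の向きを修正する。グリフではフォントの下が上になるため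
--     # mat を上下反転してからビットパックすることで表示の上下逆転を解消する。
--     mat = list(reversed(mat))
--
--     # 列ごとに整数化（bit 0 = top）
--     cols_ints: List[int] = []
--     for c in range(cols):
--         v = 0
--         for y in range(rows):
--             if mat[y][c]:
--                 v |= (1 << y)
--         cols_ints.append(v)
--     return cols_ints
-- ===== SOURCE B (Python) =====
-- from typing import List
--
-- def build_14x14_from_12x12(bitmap_lines: List[str], expected_w: int = 12, expected_h: int = 12) -> List[int]:
--     """One pass: OR each set pixel straight into the packed column words.
--     Column 1+c gets bit 12-r for source row r (the vertical flip folded in)."""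
--     bdf_width = 4 * len(bitmap_lines[0]) if bitmap_lines else expected_w
--     cols_ints = [0] * 14
--     for r_idx, hexrow in enumerate(bitmap_lines[:expected_h]):
--         try:
--             val = int(hexrow, 16)
--         except ValueError:
--             val = 0
--         for c_idx in range(min(bdf_width, expected_w)):
--             if (val >> (bdf_width - 1 - c_idx)) & 1:
--                 cols_ints[1 + c_idx] |= 1 << (12 - r_idx)
--     return cols_ints
-- ===== Notes on version B (the rewrite author's own statement) =====
-- stated objective: simpler
-- what changed: B drops A's three passes (fill a 14x14 matrix, reverse it, pack each column bit by bit) and instead ORs each set pixel directly into the packed column words in a single pass, folding the vertical flip into the bit position 12 - row.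
-- outside the precondition, e.g. on build_14x14_from_12x12(['ffff'], 16, 12): A raises IndexError, B raises IndexError
import Mathlib
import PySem

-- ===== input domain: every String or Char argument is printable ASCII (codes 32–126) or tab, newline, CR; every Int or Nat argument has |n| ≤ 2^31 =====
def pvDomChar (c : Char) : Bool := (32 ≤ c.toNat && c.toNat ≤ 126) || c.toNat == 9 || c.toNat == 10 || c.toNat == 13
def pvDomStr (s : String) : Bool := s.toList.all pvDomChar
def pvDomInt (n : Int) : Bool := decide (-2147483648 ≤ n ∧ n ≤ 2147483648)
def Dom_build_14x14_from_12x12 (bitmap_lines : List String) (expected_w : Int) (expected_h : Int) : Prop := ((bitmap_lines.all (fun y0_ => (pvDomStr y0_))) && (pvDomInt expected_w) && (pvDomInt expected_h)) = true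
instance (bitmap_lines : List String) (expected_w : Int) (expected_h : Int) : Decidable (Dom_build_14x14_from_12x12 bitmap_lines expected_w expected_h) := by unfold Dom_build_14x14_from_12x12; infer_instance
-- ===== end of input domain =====

-- B replaces A's three passes (fill a 14×14 matrix, reverse it, pack columns) by one pass
-- that ORs each set pixel straight into the packed column words (objective: simpler).

-- ===== PORT A =====
def hexrow_to_bits (hexstr : String) (width : Int) : List Int :=
  let val : Int := (PySem.Int.ofStrBase? hexstr 16).getD 0
  (PySem.List.pyRange 0 width 1).foldl
    (fun bits i => bits ++ [PySem.Int.band (val >>> (width - 1 - i).toNat) 1]) []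

def infer_bdf_width_from_hex (hexstr : String) : Int := PySem.Str.len hexstr * 4

def build_14x14_from_12x12 (bitmap_lines : List String) (expected_w : Int) (expected_h : Int) : List Int :=
  let mat : List (List Int) :=
    (PySem.List.pyRange 0 14 1).map (fun _ => (PySem.List.pyRange 0 14 1).map (fun _ => (0 : Int)))
  let bdf_width : Int :=
    match bitmap_lines with
    | [] => expected_w
    | l0 :: _ => infer_bdf_width_from_hex l0
  let mat :=
    (PySem.List.enumerate (PySem.List.slice bitmap_lines none (some expected_h)) 0).foldl
      (fun mat re =>
        let bits := hexrow_to_bits re.2 bdf_width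
        (PySem.List.pyRange 0 (min bdf_width expected_w) 1).foldl
          (fun mat c =>
            PySem.List.pySetD mat (1 + re.1)
              (PySem.List.pySetD (PySem.List.pyGetD mat (1 + re.1) []) (1 + c)
                (PySem.List.pyGetD bits c 0)))
          mat)
      mat
  let mat := mat.reverse
  (PySem.List.pyRange 0 14 1).foldl
    (fun cols_ints c =>
      cols_ints ++ [(PySem.List.pyRange 0 14 1).foldl
        (fun v y =>
          if PySem.List.pyGetD (PySem.List.pyGetD mat y []) c 0 ≠ 0
          then PySem.Int.bor v ((1 : Int) <<< y.toNat)
          else v)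
        0])
    []

-- ===== PORT B =====
def build_14x14_from_12x12_alt (bitmap_lines : List String) (expected_w : Int) (expected_h : Int) : List Int :=
  let bdf_width : Int :=
    match bitmap_lines with
    | [] => expected_w
    | l0 :: _ => 4 * PySem.Str.len l0
  (PySem.List.enumerate (PySem.List.slice bitmap_lines none (some expected_h)) 0).foldl
    (fun cols_ints re =>
      let val : Int := (PySem.Int.ofStrBase? re.2 16).getD 0
      (PySem.List.pyRange 0 (min bdf_width expected_w) 1).foldl
        (fun cols_ints c =>
          if PySem.Int.band (val >>> (bdf_width - 1 - c).toNat) 1 ≠ 0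
          then PySem.List.pySetD cols_ints (1 + c)
                 (PySem.Int.bor (PySem.List.pyGetD cols_ints (1 + c) 0) ((1 : Int) <<< (12 - re.1).toNat))
          else cols_ints)
        cols_ints)
    (List.replicate 14 (0 : Int))

-- ===== PRECONDITION & SPEC =====
-- Pre_ excludes exactly the inputs on which A raises IndexError: writes outside the
-- 14×14 canvas (more than 13 placed rows, or more than 13 placed columns, while at
-- least one cell is actually written).
def Pre_build_14x14_from_12x12 (bitmap_lines : List String) (expected_w : Int) (expected_h : Int) : Prop :=
  let n : Int := bitmap_lines.length
  let nrows : Int := max 0 (min (if expected_h < 0 then n + expected_h else expected_h) n)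
  let effw : Int :=
    match bitmap_lines with
    | [] => expected_w
    | l0 :: _ => 4 * (l0.toList.length : Int)
  let k : Int := min effw expected_w
  nrows = 0 ∨ k ≤ 0 ∨ (nrows ≤ 13 ∧ k ≤ 13)
instance (bitmap_lines : List String) (expected_w : Int) (expected_h : Int) : Decidable (Pre_build_14x14_from_12x12 bitmap_lines expected_w expected_h) := by unfold Pre_build_14x14_from_12x12; infer_instance

def pvWitness_build_14x14_from_12x12 : List String × Int × Int := (["ff0", "123", "0a5"], 12, 12)

def Spec_build_14x14_from_12x12 (bitmap_lines : List String) (expected_w : Int) (expected_h : Int) (out : List Int) : Prop := out = build_14x14_from_12x12_alt bitmap_lines expected_w expected_h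
instance (bitmap_lines : List String) (expected_w : Int) (expected_h : Int) (out : List Int) : Decidable (Spec_build_14x14_from_12x12 bitmap_lines expected_w expected_h out) := by unfold Spec_build_14x14_from_12x12; infer_instance

-- ===== CLAIM (what is proved, stated in full; the proofs are below) =====
def Claim_equal_build_14x14_from_12x12 : Prop := ∀ (bitmap_lines : List String) (expected_w : Int) (expected_h : Int), Dom_build_14x14_from_12x12 bitmap_lines expected_w expected_h → Pre_build_14x14_from_12x12 bitmap_lines expected_w expected_h → Spec_build_14x14_from_12x12 bitmap_lines expected_w expected_h (build_14x14_from_12x12 bitmap_lines expected_w expected_h)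

-- ===== LEMMAS AND PROOFS =====

-- The single pixel value A and B both read: bit c (MSB first, width W) of int(s, 16) (0 on parse failure).
def pvBit (W : Int) (s : String) (c : Int) : Int :=
  PySem.Int.band (((PySem.Int.ofStrBase? s 16).getD 0) >>> (W - 1 - c).toNat) 1

-- A's packing pass, applied to the reversed matrix (exactly the port's final fold).
def pvPack (m : List (List Int)) : List Int :=
  (PySem.List.pyRange 0 14 1).foldl
    (fun cols_ints c =>
      cols_ints ++ [(PySem.List.pyRange 0 14 1).foldl
        (fun v y =>
          if PySem.List.pyGetD (PySem.List.pyGetD m.reverse y []) c 0 ≠ 0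
          then PySem.Int.bor v ((1 : Int) <<< y.toNat)
          else v)
        0])
    []

-- The row A writes for source line x: positions 1..k carry the bits, the rest is 0.
def pvRowSpec (W k : Int) (x : String) : List Int :=
  List.map (fun j : Nat => if 1 ≤ (j : Int) ∧ (j : Int) ≤ k then pvBit W x ((j : Int) - 1) else 0) (List.range 14)

-- What A's placement loop does to the matrix, row by row.
def pvMatPlace (W k : Int) : List String → Nat → List (List Int) → List (List Int)
  | [], _, mat => mat
  | x :: L, s, mat => pvMatPlace W k L (s + 1) (mat.set (1 + s) (pvRowSpec W k x))



-- B's whole loop (exactly the port's outer fold).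
def pvOuterB (W w : Int) (L : List String) (s : Int) (cols : List Int) : List Int :=
  (PySem.List.enumerate L s).foldl
    (fun cols_ints re =>
      let val : Int := (PySem.Int.ofStrBase? re.2 16).getD 0
      (PySem.List.pyRange 0 (min W w) 1).foldl
        (fun cols_ints c =>
          if PySem.Int.band (val >>> (W - 1 - c).toNat) 1 ≠ 0
          then PySem.List.pySetD cols_ints (1 + c)
                 (PySem.Int.bor (PySem.List.pyGetD cols_ints (1 + c) 0) ((1 : Int) <<< (12 - re.1).toNat))
          else cols_ints)
        cols_ints)
    cols

-- One loop step of B: its outer fold run on the single line x.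
def pvInnerB (W w : Int) (x : String) (s : Int) (cols : List Int) : List Int :=
  pvOuterB W w [x] s cols

-- A's whole placement loop (exactly the port's outer fold).
def pvOuterA (W w : Int) (L : List String) (s : Int) (mat : List (List Int)) : List (List Int) :=
  (PySem.List.enumerate L s).foldl
    (fun mat re =>
      let bits := hexrow_to_bits re.2 W
      (PySem.List.pyRange 0 (min W w) 1).foldl
        (fun mat c =>
          PySem.List.pySetD mat (1 + re.1)
            (PySem.List.pySetD (PySem.List.pyGetD mat (1 + re.1) []) (1 + c)
              (PySem.List.pyGetD bits c 0)))
        mat)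
    mat

def pvMat0 : List (List Int) :=
  (PySem.List.pyRange 0 14 1).map (fun _ => (PySem.List.pyRange 0 14 1).map (fun _ => (0 : Int)))

def pvWA (bitmap_lines : List String) (expected_w : Int) : Int :=
  match bitmap_lines with
  | [] => expected_w
  | l0 :: _ => infer_bdf_width_from_hex l0

def pvWB (bitmap_lines : List String) (expected_w : Int) : Int :=
  match bitmap_lines with
  | [] => expected_w
  | l0 :: _ => 4 * PySem.Str.len l0

lemma pvWA_eq_pvWB (bitmap_lines : List String) (expected_w : Int) :
    pvWA bitmap_lines expected_w = pvWB bitmap_lines expected_w := by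
  cases bitmap_lines with
  | nil => rfl
  | cons l0 t => simp [pvWA, pvWB, infer_bdf_width_from_hex, mul_comm]

lemma pvA_shape (bitmap_lines : List String) (expected_w expected_h : Int) :
    build_14x14_from_12x12 bitmap_lines expected_w expected_h
      = pvPack (pvOuterA (pvWA bitmap_lines expected_w) expected_w
          (PySem.List.slice bitmap_lines none (some expected_h)) 0 pvMat0) := rfl

lemma pvB_shape (bitmap_lines : List String) (expected_w expected_h : Int) :
    build_14x14_from_12x12_alt bitmap_lines expected_w expected_h
      = pvOuterB (pvWB bitmap_lines expected_w) expected_w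
          (PySem.List.slice bitmap_lines none (some expected_h)) 0 (List.replicate 14 0) := rfl

lemma pvSet_getD_self {α : Type} (xs : List α) (i : Nat) (d : α) :
    xs.set i (xs.getD i d) = xs := by
  by_cases h : i < xs.length
  · apply List.ext_getElem
    · simp
    · intro j hj hj2
      rw [List.getElem_set]
      split_ifs with he
      · subst he; rw [List.getD_eq_getElem _ _ h]
      · rfl
  · rw [List.set_eq_of_length_le (by omega)]

lemma pvMapRange_getD (n j : Nat) (g : Nat → Int) (d : Int) (hj : j < n) :
    ((List.range n).map g).getD j d = g j := by
  rw [List.getD_eq_getElem _ _ (by simpa using hj)]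
  simp

lemma pvMapRange_set (n i : Nat) (g : Nat → Int) (v : Int) :
    ((List.range n).map g).set i v = (List.range n).map (fun j => if j = i then v else g j) := by
  apply List.ext_getElem
  · simp
  · intro j hj hj2
    simp only [List.getElem_set, List.getElem_map, List.getElem_range]
    by_cases h : j = i
    · simp [h]
    · simp [h, Ne.symm h]


lemma pvBits_eq (s : String) (W : Int) :
    hexrow_to_bits s W = (PySem.List.pyRange 0 W 1).map (fun i => pvBit W s i) := by
  simp only [hexrow_to_bits]
  rw [PySem.List.foldl_append_singleton_eq_map]
  simp [pvBit]

lemma pvBits_get (s : String) (W c : Int) (h0 : 0 ≤ c) (h1 : c < W) :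
    PySem.List.pyGetD (hexrow_to_bits s W) c 0 = pvBit W s c := by
  rw [pvBits_eq]
  exact PySem.List.pyGetD_map_pyRange_of_nonneg _ _ _ _ h0 h1

-- a fold that writes one full row of the matrix is a single row update
lemma pvFoldlRowSet {α : Type} (cl : List α) (g : List Int → α → List Int)
    (mat : List (List Int)) (y : Nat) (hy : y < mat.length) :
    cl.foldl (fun m c => m.set y (g (m.getD y []) c)) mat
      = mat.set y (cl.foldl g (mat.getD y [])) := by
  induction cl generalizing mat with
  | nil =>
    simp only [List.foldl_nil]
    exact (pvSet_getD_self mat y []).symm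
  | cons c cl ih =>
    simp only [List.foldl_cons]
    rw [ih _ (by simpa using hy)]
    rw [List.set_set]
    congr 1
    rw [List.getD_eq_getElem _ _ (by simpa using hy), List.getElem_set_self, List.getD_eq_getElem _ _ hy]

-- a left-to-right fold writing cells 1..k' of a 14-list, as a map
lemma pvSetFold (k' : Nat) (F : Nat → Int → Int) (cols : List Int)
    (hlen : cols.length = 14) (hk : k' ≤ 13) :
    (List.range k').foldl (fun cs i => cs.set (1 + i) (F i (cs.getD (1 + i) 0))) cols
      = (List.range 14).map (fun j => if 1 ≤ j ∧ j ≤ k' then F (j - 1) (cols.getD j 0) else cols.getD j 0) := by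
  induction k' with
  | zero =>
    simp only [List.range_zero, List.foldl_nil]
    apply List.ext_getElem
    · simp [hlen]
    · intro j hj hj2
      simp only [List.getElem_map, List.getElem_range]
      have hj14 : j < 14 := by simpa using hj2
      rw [if_neg (by omega), List.getD_eq_getElem _ _ (by omega)]
  | succ t ih =>
    rw [List.range_succ, List.foldl_append, ih (by omega), List.foldl_cons, List.foldl_nil]
    rw [pvMapRange_getD 14 (1 + t) _ 0 (by omega), if_neg (by omega)]
    rw [pvMapRange_set 14 (1 + t) _ _]
    apply List.map_congr_left
    intro j hj
    have hj14 : j < 14 := by simpa using hj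
    by_cases h1 : j = 1 + t
    · subst h1
      rw [if_pos rfl, if_pos (by omega)]
      have h2 : 1 + t - 1 = t := by omega
      rw [h2]
    · rw [if_neg h1]
      by_cases h2 : 1 ≤ j ∧ j ≤ t
      · rw [if_pos h2, if_pos (by omega)]
      · rw [if_neg h2, if_neg (by omega)]


-- the OR-contribution sums that A's packing loop accumulates, column j
def pvColPS (m : List (List Int)) (j : Nat) : Int :=
  ∑ y ∈ Finset.range 14,
    (if PySem.List.pyGetD (PySem.List.pyGetD m.reverse (y : Int) []) (j : Int) 0 ≠ 0 then (2 : Int) ^ y else 0)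

lemma pvSum_bounds (cond : Nat → Prop) [DecidablePred cond] (m : Nat) :
    0 ≤ (∑ y ∈ Finset.range m, (if cond y then (2 : Int) ^ y else 0)) ∧
      (∑ y ∈ Finset.range m, (if cond y then (2 : Int) ^ y else 0)) < 2 ^ m := by
  induction m with
  | zero => simp
  | succ t ih =>
    rw [Finset.sum_range_succ]
    constructor
    · have : (0 : Int) ≤ (if cond t then (2 : Int) ^ t else 0) := by
        split_ifs
        · positivity
        · exact le_refl _
      omega
    · have h2 : (if cond t then (2 : Int) ^ t else 0) ≤ 2 ^ t := by
        split_ifs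
        · exact le_refl _
        · positivity
      have h3 : (2 : Int) ^ t + 2 ^ t = 2 ^ (t + 1) := by ring
      omega

lemma pvBorPow (v : Int) (p : Nat) (h0 : 0 ≤ v) (hv : v < 2 ^ p) :
    PySem.Int.bor v ((2 : Int) ^ p) = v + 2 ^ p := by
  rw [PySem.Int.bor_of_nonneg h0 (by positivity)]
  have h1 : ((2 : Int) ^ p).toNat = 2 ^ p := by
    rw [show ((2 : Int) ^ p) = ((2 ^ p : Nat) : Int) by push_cast; ring, Int.toNat_natCast]
  have h2 : v.toNat < 2 ^ p := by
    have : ((2 : Int) ^ p) = ((2 ^ p : Nat) : Int) := by push_cast; ring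
    omega
  have h3 := Nat.two_pow_add_eq_or_of_lt h2 1
  rw [mul_one] at h3
  rw [h1, Nat.or_comm, ← h3]
  have : ((2 : Int) ^ p) = ((2 ^ p : Nat) : Int) := by push_cast; ring
  omega

lemma pvBorPowDvd (v : Int) (p : Nat) (h0 : 0 ≤ v) (hv : (2 : Int) ^ (p + 1) ∣ v) :
    PySem.Int.bor v ((2 : Int) ^ p) = v + 2 ^ p := by
  rw [PySem.Int.bor_of_nonneg h0 (by positivity)]
  have h1 : ((2 : Int) ^ p).toNat = 2 ^ p := by
    rw [show ((2 : Int) ^ p) = ((2 ^ p : Nat) : Int) by push_cast; ring, Int.toNat_natCast]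
  obtain ⟨a, ha⟩ := hv
  have hpos : (0 : Int) < 2 ^ (p + 1) := by positivity
  have ha0 : 0 ≤ a := by nlinarith
  have hvN : v.toNat = 2 ^ (p + 1) * a.toNat := by
    have h4 : ((2 : Int) ^ (p + 1)) = ((2 ^ (p + 1) : Nat) : Int) := by push_cast; ring
    have h5 : a = (a.toNat : Int) := (Int.toNat_of_nonneg ha0).symm
    rw [h4, h5] at ha
    omega
  have h6 := Nat.two_pow_add_eq_or_of_lt (Nat.pow_lt_pow_right (by omega) (by omega) : 2 ^ p < 2 ^ (p + 1)) a.toNat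
  have h5 : ((a.toNat : Int)) = a := Int.toNat_of_nonneg ha0
  rw [h1, hvN, ← h6]
  push_cast [h5]
  linarith [ha]

lemma pvOrFoldSum (cond : Int → Prop) [DecidablePred cond] (m : Nat) :
    (PySem.List.pyRange 0 (m : Int) 1).foldl
        (fun v y => if cond y then PySem.Int.bor v ((1 : Int) <<< y.toNat) else v) 0
      = ∑ y ∈ Finset.range m, (if cond (y : Int) then (2 : Int) ^ y else 0) := by
  induction m with
  | zero => simp [PySem.List.pyRange_one_eq_nil]
  | succ t ih =>
    have hc : ((t : Int) + 1) = ((t + 1 : Nat) : Int) := by push_cast; ring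
    rw [Finset.sum_range_succ, ← ih]
    rw [← hc, PySem.List.pyRange_one_succ_right (by positivity), List.foldl_append, List.foldl_cons, List.foldl_nil]
    rw [ih]
    have hb := pvSum_bounds (fun y => cond (y : Int)) t
    split_ifs with h
    · rw [Int.shiftLeft_eq, one_mul, Int.toNat_natCast]
      exact pvBorPow _ t hb.1 hb.2
    · omega

lemma pvPack_char (m : List (List Int)) :
    pvPack m = (List.range 14).map (fun j => pvColPS m j) := by
  rw [pvPack, PySem.List.foldl_append_singleton_eq_map, List.nil_append]
  have h14 : PySem.List.pyRange 0 (14 : Int) 1 = List.map (fun k : Nat => (k : Int)) (List.range 14) := by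
    rw [PySem.List.pyRange_one]
    norm_num
    rw [show Int.toNat 14 = 14 from rfl]
  rw [h14, List.map_map]
  apply List.map_congr_left
  intro j hj
  simp only [Function.comp]
  have h := pvOrFoldSum (fun y => PySem.List.pyGetD (PySem.List.pyGetD m.reverse y []) (j : Int) 0 ≠ 0) 14
  rw [show ((14 : Nat) : Int) = (14 : Int) from rfl] at h
  rw [pvColPS, ← h, h14]


lemma pvRangeNat (k : Int) :
    PySem.List.pyRange 0 k 1 = List.map (fun i : Nat => (i : Int)) (List.range k.toNat) := by
  rw [PySem.List.pyRange_one]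
  simp only [sub_zero, zero_add]

lemma pvPack_length (m : List (List Int)) : (pvPack m).length = 14 := by
  rw [pvPack_char]; simp

lemma pvPack_getD (m : List (List Int)) (j : Nat) (hj : j < 14) :
    (pvPack m).getD j 0 = pvColPS m j := by
  rw [pvPack_char]; exact pvMapRange_getD _ _ _ _ hj

lemma pvRev_getD (mat : List (List Int)) (hlen : mat.length = 14) (y : Nat) (hy : y < 14) :
    mat.reverse.getD y [] = mat.getD (13 - y) [] := by
  rw [List.getD_eq_getElem _ _ (by simp [hlen]; omega), List.getD_eq_getElem _ _ (by omega)]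
  rw [List.getElem_reverse]
  congr 1
  omega

lemma pvReplicate_cell (j : Int) : PySem.List.pyGetD (List.replicate 14 (0 : Int)) j 0 = 0 := by
  by_cases h : PySem.Raise.InRange (List.replicate 14 (0 : Int)).length j
  · exact List.eq_of_mem_replicate (PySem.List.pyGetD_mem _ _ h)
  · exact PySem.List.pyGetD_of_none _ _ _ ((PySem.List.pyGet?_eq_none_iff _ _).mpr h)

lemma pvPackStep (W w : Int) (hk : min W w ≤ 13) (x : String) (s : Nat) (hs : s ≤ 12)
    (mat : List (List Int)) (hlen : mat.length = 14)
    (hz : ∀ i, i < 14 → (i = 0 ∨ s < i) → mat.getD i [] = List.replicate 14 0) :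
    pvInnerB W w x (s : Int) (pvPack mat)
      = pvPack (mat.set (1 + s) (pvRowSpec W (min W w) x)) := by
  have hk' : (min W w).toNat ≤ 13 := by omega
  simp only [pvInnerB, pvOuterB, PySem.List.enumerate_cons, PySem.List.enumerate_nil,
    List.foldl_cons, List.foldl_nil]
  rw [pvRangeNat, List.foldl_map]
  have hstep :
      (fun (cols_ints : List Int) (i : Nat) =>
        if PySem.Int.band (((PySem.Int.ofStrBase? x 16).getD 0) >>> (W - 1 - (i : Int)).toNat) 1 ≠ 0
        then PySem.List.pySetD cols_ints (1 + (i : Int))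
               (PySem.Int.bor (PySem.List.pyGetD cols_ints (1 + (i : Int)) 0)
                 ((1 : Int) <<< (((12 - (s : Int)).toNat : Nat) : Int)))
        else cols_ints)
      = (fun (cs : List Int) (i : Nat) =>
          cs.set (1 + i) (if pvBit W x (i : Int) ≠ 0 then PySem.Int.bor (cs.getD (1 + i) 0) ((2 : Int) ^ (12 - s)) else cs.getD (1 + i) 0)) := by
    funext cs i
    have hcast : (1 : Int) + (i : Int) = ((1 + i : Nat) : Int) := by push_cast; ring
    have hsh : ((1 : Int) <<< (((12 - (s : Int)).toNat : Nat) : Int)) = (2 : Int) ^ (12 - s) := by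
      rw [Int.shiftLeft_natCast_right, Int.shiftLeft_eq, one_mul]
      congr 1
      omega
    rw [hcast, PySem.List.pySetD_natCast, PySem.List.pyGetD_natCast, hsh]
    simp only [pvBit]
    split_ifs with h
    · rfl
    · exact (pvSet_getD_self cs (1 + i) 0).symm
  rw [hstep]
  rw [pvSetFold (min W w).toNat
        (fun i v => if pvBit W x (i : Int) ≠ 0 then PySem.Int.bor v ((2 : Int) ^ (12 - s)) else v)
        (pvPack mat) (pvPack_length mat) hk']
  rw [pvPack_char (mat.set (1 + s) (pvRowSpec W (min W w) x))]
  apply List.map_congr_left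
  intro j hj
  have hj14 : j < 14 := List.mem_range.mp hj
  rw [pvPack_getD _ _ hj14]
  have hcellm : ∀ (m2 : List (List Int)), m2.length = 14 → ∀ y : Nat, y < 14 →
      PySem.List.pyGetD m2.reverse (y : Int) [] = m2.getD (13 - y) [] := by
    intro m2 h2 y hy
    rw [PySem.List.pyGetD_natCast, pvRev_getD m2 h2 y hy]
  have hlen' : (mat.set (1 + s) (pvRowSpec W (min W w) x)).length = 14 := by simp [hlen]
  -- future rows (and row 0) of mat are zero, in particular the row being written
  have hrow0 : mat.getD (1 + s) [] = List.replicate 14 0 := hz (1 + s) (by omega) (by omega)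
  -- cells of the updated matrix
  have hcell' : ∀ y : Nat, y < 14 → y ≠ 12 - s →
      (mat.set (1 + s) (pvRowSpec W (min W w) x)).getD (13 - y) [] = mat.getD (13 - y) [] := by
    intro y hy hne
    have h13 : 13 - y < mat.length := by omega
    rw [List.getD_eq_getElem _ _ (by simpa using h13), List.getD_eq_getElem _ _ h13]
    rw [List.getElem_set]
    rw [if_neg (by omega)]
  have hcase : (mat.set (1 + s) (pvRowSpec W (min W w) x)).getD (13 - (12 - s)) []
      = pvRowSpec W (min W w) x := by
    have h1 : 13 - (12 - s) = 1 + s := by omega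
    rw [h1, List.getD_eq_getElem _ _ (by omega : 1 + s < (mat.set (1 + s) (pvRowSpec W (min W w) x)).length)]
    exact List.getElem_set_self _
  -- value of the fresh cell
  have hfresh : PySem.List.pyGetD (pvRowSpec W (min W w) x) (j : Int) 0
      = if 1 ≤ (j : Int) ∧ (j : Int) ≤ min W w then pvBit W x ((j : Int) - 1) else 0 := by
    rw [pvRowSpec, PySem.List.pyGetD_natCast, pvMapRange_getD _ _ _ _ hj14]
  have hy0 : (12 - s) ∈ Finset.range 14 := Finset.mem_range.mpr (by omega)
  have hsum : pvColPS (mat.set (1 + s) (pvRowSpec W (min W w) x)) j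
      = pvColPS mat j
        + (if 1 ≤ (j : Int) ∧ (j : Int) ≤ min W w ∧ pvBit W x ((j : Int) - 1) ≠ 0
           then (2 : Int) ^ (12 - s) else 0) := by
    rw [pvColPS, pvColPS]
    rw [← Finset.add_sum_erase _ _ hy0, ← Finset.add_sum_erase _ _ hy0]
    have htail :
        (∑ y ∈ (Finset.range 14).erase (12 - s),
          (if PySem.List.pyGetD (PySem.List.pyGetD (mat.set (1 + s) (pvRowSpec W (min W w) x)).reverse (y : Int) []) (j : Int) 0 ≠ 0 then (2 : Int) ^ y else 0))
        = (∑ y ∈ (Finset.range 14).erase (12 - s),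
          (if PySem.List.pyGetD (PySem.List.pyGetD mat.reverse (y : Int) []) (j : Int) 0 ≠ 0 then (2 : Int) ^ y else 0)) := by
      apply Finset.sum_congr rfl
      intro y hy
      have hyne : y ≠ 12 - s := (Finset.mem_erase.mp hy).1
      have hy14 : y < 14 := by
        have := (Finset.mem_erase.mp hy).2
        simpa using this
      rw [hcellm _ hlen' y hy14, hcellm _ hlen y hy14, hcell' y hy14 hyne]
    rw [htail]
    have hhead2 :
        (if PySem.List.pyGetD (PySem.List.pyGetD (mat.set (1 + s) (pvRowSpec W (min W w) x)).reverse ((12 - s : Nat) : Int) []) (j : Int) 0 ≠ 0 then (2 : Int) ^ (12 - s) else 0)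
        = (if 1 ≤ (j : Int) ∧ (j : Int) ≤ min W w ∧ pvBit W x ((j : Int) - 1) ≠ 0 then (2 : Int) ^ (12 - s) else 0) := by
      rw [hcellm _ hlen' (12 - s) (by omega), hcase, hfresh]
      by_cases hc : 1 ≤ (j : Int) ∧ (j : Int) ≤ min W w
      · rw [if_pos hc]
        by_cases hb : pvBit W x ((j : Int) - 1) ≠ 0
        · rw [if_pos hb, if_pos ⟨hc.1, hc.2, hb⟩]
        · rw [if_neg hb, if_neg (by tauto)]
      · rw [if_neg hc,
            if_neg (show ¬(1 ≤ (j : Int) ∧ (j : Int) ≤ min W w ∧ pvBit W x ((j : Int) - 1) ≠ 0) by tauto)]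
        simp
    have hhead1 :
        (if PySem.List.pyGetD (PySem.List.pyGetD mat.reverse ((12 - s : Nat) : Int) []) (j : Int) 0 ≠ 0 then (2 : Int) ^ (12 - s) else 0) = 0 := by
      rw [hcellm _ hlen (12 - s) (by omega)]
      rw [show (13 - (12 - s)) = 1 + s from by omega, hrow0, pvReplicate_cell]
      simp
    rw [hhead2, hhead1]
    ring
  rw [hsum]
  have h0 : 0 ≤ pvColPS mat j := by
    rw [pvColPS]
    apply Finset.sum_nonneg
    intro y hy
    split_ifs
    · positivity
    · exact le_refl _
  have hdvd : (2 : Int) ^ (13 - s) ∣ pvColPS mat j := by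
    rw [pvColPS]
    apply Finset.dvd_sum
    intro y hy
    have hy14 : y < 14 := by simpa using hy
    by_cases hylt : y < 13 - s
    · have hc0 : PySem.List.pyGetD (PySem.List.pyGetD mat.reverse (y : Int) []) (j : Int) 0 = 0 := by
        rw [hcellm _ hlen y hy14, hz (13 - y) (by omega) (Or.inr (by omega))]
        exact pvReplicate_cell _
      rw [hc0]
      simp
    · split_ifs
      · exact pow_dvd_pow 2 (by omega)
      · exact dvd_zero _
  by_cases hcnat : 1 ≤ j ∧ j ≤ (min W w).toNat
  · rw [if_pos hcnat]
    have hjj : ((j - 1 : Nat) : Int) = (j : Int) - 1 := by omega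
    simp only [hjj]
    by_cases hbit : pvBit W x ((j : Int) - 1) ≠ 0
    · rw [if_pos hbit, if_pos ⟨by omega, by omega, hbit⟩]
      rw [pvBorPowDvd _ _ h0 (by rw [show (12 - s) + 1 = 13 - s from by omega]; exact hdvd)]
    · rw [if_neg hbit, if_neg (by tauto), add_zero]
  · rw [if_neg hcnat, if_neg (by rintro ⟨h1, h2, _⟩; exact hcnat ⟨by omega, by omega⟩), add_zero]


-- One loop step of A: its outer fold run on the single line x.
def pvInnerA (W w : Int) (x : String) (s : Int) (mat : List (List Int)) : List (List Int) :=
  pvOuterA W w [x] s mat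

lemma pvOuterA_cons (W w : Int) (x : String) (L : List String) (s : Int) (mat : List (List Int)) :
    pvOuterA W w (x :: L) s mat = pvOuterA W w L (s + 1) (pvInnerA W w x s mat) := rfl

lemma pvOuterB_cons (W w : Int) (x : String) (L : List String) (s : Int) (cols : List Int) :
    pvOuterB W w (x :: L) s cols = pvOuterB W w L (s + 1) (pvInnerB W w x s cols) := rfl

lemma pvOuterA_nil (W w : Int) (s : Int) (mat : List (List Int)) : pvOuterA W w [] s mat = mat := rfl

lemma pvOuterB_nil (W w : Int) (s : Int) (cols : List Int) : pvOuterB W w [] s cols = cols := rfl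

lemma pvRowStep (W w : Int) (hk : min W w ≤ 13) (x : String) (s : Nat) (hs : s ≤ 12)
    (mat : List (List Int)) (hlen : mat.length = 14)
    (hrow0 : mat.getD (1 + s) [] = List.replicate 14 0) :
    pvInnerA W w x (s : Int) mat = mat.set (1 + s) (pvRowSpec W (min W w) x) := by
  have hk' : (min W w).toNat ≤ 13 := by omega
  simp only [pvInnerA, pvOuterA, PySem.List.enumerate_cons, PySem.List.enumerate_nil,
    List.foldl_cons, List.foldl_nil]
  have hc : (1 : Int) + (s : Int) = ((1 + s : Nat) : Int) := by push_cast; ring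
  simp only [hc, PySem.List.pySetD_natCast, PySem.List.pyGetD_natCast]
  rw [pvFoldlRowSet _
        (fun row c => PySem.List.pySetD row (1 + c) (PySem.List.pyGetD (hexrow_to_bits x W) c 0))
        mat (1 + s) (by omega)]
  rw [hrow0]
  congr 1
  rw [pvRangeNat, List.foldl_map]
  have hstep :
      (fun (row : List Int) (i : Nat) =>
        PySem.List.pySetD row (1 + (i : Int)) (PySem.List.pyGetD (hexrow_to_bits x W) (i : Int) 0))
      = (fun (cs : List Int) (i : Nat) =>
          cs.set (1 + i) (PySem.List.pyGetD (hexrow_to_bits x W) (i : Int) 0)) := by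
    funext cs i
    have hcast : (1 : Int) + (i : Int) = ((1 + i : Nat) : Int) := by push_cast; ring
    rw [hcast, PySem.List.pySetD_natCast]
  rw [hstep]
  rw [pvSetFold (min W w).toNat
        (fun (i : Nat) (_ : Int) => PySem.List.pyGetD (hexrow_to_bits x W) (i : Int) 0)
        (List.replicate 14 0) (by simp) hk']
  rw [pvRowSpec]
  apply List.map_congr_left
  intro j hj
  have hj14 : j < 14 := List.mem_range.mp hj
  have hWge : min W w ≤ W := min_le_left _ _
  by_cases hcnat : 1 ≤ j ∧ j ≤ (min W w).toNat
  · rw [if_pos hcnat, if_pos (by constructor <;> omega)]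
    have hjj : ((j - 1 : Nat) : Int) = (j : Int) - 1 := by omega
    rw [hjj, pvBits_get x W _ (by omega) (by omega)]
  · rw [if_neg hcnat, if_neg (by omega)]
    rw [List.getD_eq_getElem _ _ (by simpa using hj14)]
    exact List.getElem_replicate _

lemma pvCombined (W w : Int) (hk : min W w ≤ 13) (L : List String) (s : Nat)
    (mat : List (List Int)) (hlen : mat.length = 14)
    (hz : ∀ i, i < 14 → (i = 0 ∨ s < i) → mat.getD i [] = List.replicate 14 0)
    (hsl : s + L.length ≤ 13) :
    pvOuterB W w L (s : Int) (pvPack mat) = pvPack (pvMatPlace W (min W w) L s mat) := by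
  induction L generalizing s mat with
  | nil => rw [pvOuterB_nil, pvMatPlace]
  | cons x L ih =>
    rw [pvOuterB_cons, pvMatPlace]
    have hs12 : s ≤ 12 := by
      have := L.length
      simp at hsl
      omega
    rw [pvPackStep W w hk x s hs12 mat hlen hz]
    have hc1 : (s : Int) + 1 = ((s + 1 : Nat) : Int) := by push_cast; ring
    rw [hc1]
    apply ih (s + 1)
    · simp [hlen]
    · intro i hi hcond
      rw [List.getD_eq_getElem _ _ (by simp [hlen]; omega), List.getElem_set, if_neg (by omega)]
      rw [← List.getD_eq_getElem _ _ (by omega : i < mat.length)]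
      exact hz i hi (by omega)
    · simp at hsl ⊢
      omega

lemma pvOuterA_place (W w : Int) (hk : min W w ≤ 13) (L : List String) (s : Nat)
    (mat : List (List Int)) (hlen : mat.length = 14)
    (hz : ∀ i, i < 14 → (i = 0 ∨ s < i) → mat.getD i [] = List.replicate 14 0)
    (hsl : s + L.length ≤ 13) :
    pvOuterA W w L (s : Int) mat = pvMatPlace W (min W w) L s mat := by
  induction L generalizing s mat with
  | nil => rw [pvOuterA_nil, pvMatPlace]
  | cons x L ih =>
    rw [pvOuterA_cons, pvMatPlace]
    have hs12 : s ≤ 12 := by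
      simp at hsl
      omega
    rw [pvRowStep W w hk x s hs12 mat hlen (hz (1 + s) (by omega) (by omega))]
    have hc1 : (s : Int) + 1 = ((s + 1 : Nat) : Int) := by push_cast; ring
    rw [hc1]
    apply ih (s + 1)
    · simp [hlen]
    · intro i hi hcond
      rw [List.getD_eq_getElem _ _ (by simp [hlen]; omega), List.getElem_set, if_neg (by omega)]
      rw [← List.getD_eq_getElem _ _ (by omega : i < mat.length)]
      exact hz i hi (by omega)
    · simp at hsl ⊢
      omega


lemma pvInnerA_id (W w : Int) (hk0 : min W w ≤ 0) (x : String) (s : Int) (mat : List (List Int)) :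
    pvInnerA W w x s mat = mat := by
  simp only [pvInnerA, pvOuterA, PySem.List.enumerate_cons, PySem.List.enumerate_nil,
    List.foldl_cons, List.foldl_nil]
  rw [PySem.List.pyRange_one_eq_nil hk0, List.foldl_nil]

lemma pvInnerB_id (W w : Int) (hk0 : min W w ≤ 0) (x : String) (s : Int) (cols : List Int) :
    pvInnerB W w x s cols = cols := by
  simp only [pvInnerB, pvOuterB, PySem.List.enumerate_cons, PySem.List.enumerate_nil,
    List.foldl_cons, List.foldl_nil]
  rw [PySem.List.pyRange_one_eq_nil hk0, List.foldl_nil]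

lemma pvOuterA_id (W w : Int) (hk0 : min W w ≤ 0) (L : List String) (s : Int) (mat : List (List Int)) :
    pvOuterA W w L s mat = mat := by
  induction L generalizing s mat with
  | nil => rw [pvOuterA_nil]
  | cons x L ih => rw [pvOuterA_cons, pvInnerA_id W w hk0, ih]

lemma pvOuterB_id (W w : Int) (hk0 : min W w ≤ 0) (L : List String) (s : Int) (cols : List Int) :
    pvOuterB W w L s cols = cols := by
  induction L generalizing s cols with
  | nil => rw [pvOuterB_nil]
  | cons x L ih => rw [pvOuterB_cons, pvInnerB_id W w hk0, ih]

lemma pvPackMat0 : pvPack pvMat0 = List.replicate 14 0 := by decide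

lemma pvMat0_len : pvMat0.length = 14 := by decide

lemma pvMat0_rows : ∀ i, i < 14 → pvMat0.getD i [] = List.replicate 14 0 := by
  intro i hi
  interval_cases i <;> rfl

lemma pvSliceLen (ls : List String) (h : Int) :
    ((PySem.List.slice ls none (some h)).length : Int)
      = max 0 (min (if h < 0 then (ls.length : Int) + h else h) (ls.length : Int)) := by
  by_cases h0 : 0 ≤ h
  · rw [PySem.List.slice_to _ h0, List.length_take, if_neg (by omega)]
    push_cast
    omega
  · have hk : h = -(((-h).toNat : Nat) : Int) := by omega
    rw [hk, PySem.List.slice_to_neg_natCast _ _ (by omega), List.length_take, if_pos (by omega)]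
    push_cast
    omega

lemma pvPre_shape (bitmap_lines : List String) (expected_w expected_h : Int) :
    Pre_build_14x14_from_12x12 bitmap_lines expected_w expected_h →
      (PySem.List.slice bitmap_lines none (some expected_h)).length = 0
      ∨ min (pvWB bitmap_lines expected_w) expected_w ≤ 0
      ∨ ((PySem.List.slice bitmap_lines none (some expected_h)).length ≤ 13
          ∧ min (pvWB bitmap_lines expected_w) expected_w ≤ 13) := by
  intro hpre
  have hlen := pvSliceLen bitmap_lines expected_h
  cases bitmap_lines with
  | nil =>
    unfold Pre_build_14x14_from_12x12 at hpre
    simp only at hpre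
    rw [show pvWB [] expected_w = expected_w from rfl]
    simp only [List.length_nil] at hlen
    push_cast at hlen hpre
    rcases hpre with h | h | h
    · left; omega
    · right; left; omega
    · right; right; constructor <;> omega
  | cons l0 t =>
    unfold Pre_build_14x14_from_12x12 at hpre
    simp only at hpre
    rw [show pvWB (l0 :: t) expected_w = 4 * (l0.toList.length : Int) from by
      simp [pvWB, PySem.Str.len_eq]]
    simp only [List.length_cons] at hlen hpre
    push_cast at hlen hpre
    rcases hpre with h | h | h
    · left; omega
    · right; left; omega
    · right; right; constructor <;> omega

-- ===== VERDICT (by name: the statement is the Claim_ definition above) =====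
theorem build_14x14_from_12x12_spec : Claim_equal_build_14x14_from_12x12 := by
  intro lines w h _dom hpre
  unfold Spec_build_14x14_from_12x12
  rw [pvA_shape, pvB_shape, pvWA_eq_pvWB]
  rcases pvPre_shape lines w h hpre with h0 | hk0 | ⟨hn, hk⟩
  · rw [List.length_eq_zero_iff.mp h0, pvOuterA_nil, pvOuterB_nil, pvPackMat0]
  · rw [pvOuterA_id _ _ hk0, pvOuterB_id _ _ hk0, pvPackMat0]
  · have hsl : 0 + (PySem.List.slice lines none (some h)).length ≤ 13 := by omega
    have hplace := pvOuterA_place (pvWB lines w) w hk (PySem.List.slice lines none (some h)) 0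
      pvMat0 pvMat0_len (fun i hi _ => pvMat0_rows i hi) hsl
    have hcomb := pvCombined (pvWB lines w) w hk (PySem.List.slice lines none (some h)) 0
      pvMat0 pvMat0_len (fun i hi _ => pvMat0_rows i hi) hsl
    rw [Nat.cast_zero] at hplace hcomb
    rw [hplace, ← pvPackMat0, hcomb]
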